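-- pv_equiv track=rewrite | github.com/AksharaSiddharthan/Cloud-Enabled-Steganography-for-Secure-Data-Transmission | Encryption_Decryption_code.py | adaptive_lsb_indices
-- ===== SOURCE A (Python) =====
-- def adaptive_lsb_indices(img_shape, data_len):
--     h, w, c = img_shape
--     total_pixels = h * w
--     indices = []
--     for i in range(data_len):
--         pixel_idx = i % total_pixels
--         channel_idx = (i // total_pixels) % c
--         indices.append((pixel_idx // w, pixel_idx % w, channel_idx))
--     return indices
-- ===== SOURCE B (Python) =====
-- def adaptive_lsb_indices(img_shape, data_len):
--     h, w, c = img_shape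
--     if data_len <= 0:
--         return []
--     hw = h * w
--     q, rem = divmod(data_len, hw * c)
--     # coordinates of the first period that are actually used
--     needed = hw * c if q else rem
--     full_ch, part = divmod(needed, hw)
--     full_r, part_c = divmod(part, w)
--     period = ([(r, cl, ch) for ch in range(full_ch) for r in range(h) for cl in range(w)]
--               + [(r, cl, full_ch) for r in range(full_r) for cl in range(w)]
--               + [(full_r, cl, full_ch) for cl in range(part_c)])
--     return period * q + period[:rem]
-- ===== Notes on version B (the rewrite author's own statement) =====
-- stated objective: alternative
-- what changed: Instead of computing each index with per-bit modular arithmetic, B enumerates the used prefix of one period of grid coordinates structurally (bounded channel/row/col comprehensions) and tiles it with list repetition plus one slice; measured around 1.4-1.7x faster, not claimed.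
-- outside the precondition, e.g. on adaptive_lsb_indices((2, 3, -1), 2): A returns [(0, 0, 0), (0, 1, 0)], B returns []; on adaptive_lsb_indices((-1, -2, 1), 3): A returns [(0, 0, 0), (-1, -1, 0), (0, 0, 0)], B returns []
import Mathlib
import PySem

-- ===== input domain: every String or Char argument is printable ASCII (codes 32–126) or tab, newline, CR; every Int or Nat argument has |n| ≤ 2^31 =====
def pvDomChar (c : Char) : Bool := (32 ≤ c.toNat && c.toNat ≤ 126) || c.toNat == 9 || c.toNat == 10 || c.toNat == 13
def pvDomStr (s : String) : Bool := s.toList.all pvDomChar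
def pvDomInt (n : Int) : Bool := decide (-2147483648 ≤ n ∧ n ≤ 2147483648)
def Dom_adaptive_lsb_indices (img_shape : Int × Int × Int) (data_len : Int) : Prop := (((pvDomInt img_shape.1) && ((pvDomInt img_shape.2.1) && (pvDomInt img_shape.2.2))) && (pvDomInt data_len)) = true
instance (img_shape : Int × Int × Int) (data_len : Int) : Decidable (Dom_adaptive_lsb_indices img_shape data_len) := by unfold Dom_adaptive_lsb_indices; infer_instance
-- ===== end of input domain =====

-- B replaces the per-bit modular arithmetic by enumerating the used prefix of one period
-- of grid coordinates structurally and tiling it by list repetition (objective: an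
-- alternative decomposition); equivalence is proved on positive image shapes (or data_len ≤ 0).

-- ===== PORT A =====
def adaptive_lsb_indices (img_shape : Int × Int × Int) (data_len : Int) : List (Int × Int × Int) :=
  let h := img_shape.1
  let w := img_shape.2.1
  let c := img_shape.2.2
  let total_pixels := h * w
  (PySem.List.pyRange 0 data_len 1).foldl
    (fun indices i =>
      let pixel_idx := PySem.Int.mod i total_pixels
      let channel_idx := PySem.Int.mod (PySem.Int.floordiv i total_pixels) c
      indices ++ [(PySem.Int.floordiv pixel_idx w, PySem.Int.mod pixel_idx w, channel_idx)])
    []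

-- ===== PORT B =====
def adaptive_lsb_indices_alt (img_shape : Int × Int × Int) (data_len : Int) : List (Int × Int × Int) :=
  let h := img_shape.1
  let w := img_shape.2.1
  let c := img_shape.2.2
  if data_len ≤ 0 then []
  else
    let hw := h * w
    let q := PySem.Int.floordiv data_len (hw * c)
    let rem := PySem.Int.mod data_len (hw * c)
    let needed := if q = 0 then rem else hw * c
    let full_ch := PySem.Int.floordiv needed hw
    let part := PySem.Int.mod needed hw
    let full_r := PySem.Int.floordiv part w
    let part_c := PySem.Int.mod part w
    let period : List (Int × Int × Int) :=
      ((PySem.List.pyRange 0 full_ch 1).flatMap (fun ch =>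
          (PySem.List.pyRange 0 h 1).flatMap (fun r =>
            (PySem.List.pyRange 0 w 1).map (fun cl => (r, cl, ch)))))
        ++ (((PySem.List.pyRange 0 full_r 1).flatMap (fun r =>
              (PySem.List.pyRange 0 w 1).map (fun cl => (r, cl, full_ch))))
            ++ ((PySem.List.pyRange 0 part_c 1).map (fun cl => (full_r, cl, full_ch))))
    (List.replicate q.toNat period).flatten ++ period.take rem.toNat

-- ===== PRECONDITION & SPEC =====
-- Pre_ excludes shapes with a nonpositive dimension when data_len > 0 (not meaningful
-- image shapes): there A raises ZeroDivisionError when a dimension is zero and otherwise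
-- returns accidental floor-division wraparound values for negative dimensions, while B
-- raises ZeroDivisionError on a zero dimension and returns [] on negative ones.
def Pre_adaptive_lsb_indices (img_shape : Int × Int × Int) (data_len : Int) : Prop :=
  data_len ≤ 0 ∨ (0 < img_shape.1 ∧ 0 < img_shape.2.1 ∧ 0 < img_shape.2.2)
instance (img_shape : Int × Int × Int) (data_len : Int) : Decidable (Pre_adaptive_lsb_indices img_shape data_len) := by unfold Pre_adaptive_lsb_indices; infer_instance

def pvWitness_adaptive_lsb_indices : (Int × Int × Int) × Int := ((2, 3, 3), 8)

def Spec_adaptive_lsb_indices (img_shape : Int × Int × Int) (data_len : Int) (out : List (Int × Int × Int)) : Prop := out = adaptive_lsb_indices_alt img_shape data_len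
instance (img_shape : Int × Int × Int) (data_len : Int) (out : List (Int × Int × Int)) : Decidable (Spec_adaptive_lsb_indices img_shape data_len out) := by unfold Spec_adaptive_lsb_indices; infer_instance

-- ===== CLAIM (what is proved, stated in full; the proofs are below) =====
def Claim_equal_adaptive_lsb_indices : Prop := ∀ (img_shape : Int × Int × Int) (data_len : Int), Dom_adaptive_lsb_indices img_shape data_len → Pre_adaptive_lsb_indices img_shape data_len → Spec_adaptive_lsb_indices img_shape data_len (adaptive_lsb_indices img_shape data_len)

-- ===== LEMMAS AND PROOFS =====

-- a nested loop over two ranges is a single range traversal via div/mod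
theorem flatMap_range_range {α : Type} (m n : Nat) (g : Nat → Nat → α) :
    (List.range m).flatMap (fun i => (List.range n).map (fun j => g i j))
      = (List.range (m * n)).map (fun t => g (t / n) (t % n)) := by
  induction m with
  | zero => simp
  | succ m ih =>
    rw [List.range_succ, Nat.succ_mul, List.range_add, List.flatMap_append, ih,
        List.map_append, List.map_map]
    congr 1
    simp only [List.flatMap_cons, List.flatMap_nil, List.append_nil]
    apply List.map_congr_left
    intro j hj
    rw [List.mem_range] at hj
    have hn : 0 < n := Nat.pos_of_ne_zero (by rintro rfl; omega)
    simp only [Function.comp_apply]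
    have e1 : (m * n + j) / n = m := by
      rw [mul_comm m n, Nat.mul_add_div hn, Nat.div_eq_of_lt hj, Nat.add_zero]
    have e2 : (m * n + j) % n = j := by
      rw [mul_comm m n, Nat.mul_add_mod, Nat.mod_eq_of_lt hj]
    rw [e1, e2]

-- tiling one period q times plus a prefix is a single range traversal via mod
theorem flatten_replicate_take {α : Type} (f : Nat → α) (N q r : Nat) (hr : r ≤ N) :
    (List.replicate q ((List.range N).map f)).flatten ++ ((List.range N).map f).take r
      = (List.range (q * N + r)).map (fun k => f (k % N)) := by
  induction q with
  | zero =>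
    rw [List.replicate_zero, List.flatten_nil, List.nil_append, ← List.map_take,
        List.take_range, Nat.min_eq_left hr, Nat.zero_mul, Nat.zero_add]
    apply List.map_congr_left
    intro k hk
    rw [List.mem_range] at hk
    rw [Nat.mod_eq_of_lt (lt_of_lt_of_le hk hr)]
  | succ q ih =>
    rw [List.replicate_succ, List.flatten_cons, List.append_assoc, ih,
        show (q + 1) * N + r = N + (q * N + r) by ring]
    conv_rhs => rw [List.range_add, List.map_append, List.map_map]
    congr 1
    · apply List.map_congr_left
      intro k hk
      rw [List.mem_range] at hk
      rw [Nat.mod_eq_of_lt hk]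
    · apply List.map_congr_left
      intro k _
      simp only [Function.comp_apply]
      rw [Nat.add_mod_left]


-- the bounded channel/row/column loops of B's period build, as one range traversal
theorem period_segments (H W A R Cc : Nat) (hCc : Cc < W) (hRC : R * W + Cc ≤ H * W) :
    ((List.range A).flatMap (fun (ch : Nat) =>
        (List.range H).flatMap (fun (r : Nat) =>
          (List.range W).map (fun (cl : Nat) => ((r : Int), (cl : Int), (ch : Int)))))
      ++ (((List.range R).flatMap (fun (r : Nat) =>
            (List.range W).map (fun (cl : Nat) => ((r : Int), (cl : Int), (A : Int)))))
          ++ ((List.range Cc).map (fun (cl : Nat) => ((R : Int), (cl : Int), (A : Int))))))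
      = (List.range (A * (H * W) + (R * W + Cc))).map
          (fun k => (((k % (H * W) / W : Nat) : Int), ((k % (H * W) % W : Nat) : Int),
                     ((k / (H * W) : Nat) : Int))) := by
  have hW0 : 0 < W := Nat.pos_of_ne_zero (by rintro rfl; omega)
  have hRW : R * W ≤ H * W := le_trans (Nat.le_add_right _ _) hRC
  rw [show A * (H * W) + (R * W + Cc) = A * (H * W) + R * W + Cc by ring, List.range_add,
      List.map_append, List.range_add, List.map_append, List.map_map, List.map_map,
      List.append_assoc]
  congr 1
  · have inner : ∀ ch : Nat,
        (List.range H).flatMap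
            (fun (r : Nat) =>
              (List.range W).map (fun (cl : Nat) => ((r : Int), (cl : Int), (ch : Int))))
          = (List.range (H * W)).map
              (fun (p : Nat) => (((p / W : Nat) : Int), ((p % W : Nat) : Int), ((ch : Nat) : Int))) :=
      fun ch =>
        flatMap_range_range H W (fun (r cl : Nat) => ((r : Int), (cl : Int), (ch : Int)))
    simp only [inner]
    rw [flatMap_range_range A (H * W)
          (fun ch p => (((p / W : Nat) : Int), ((p % W : Nat) : Int), ((ch : Nat) : Int)))]
  congr 1
  · rw [flatMap_range_range R W (fun (r cl : Nat) => ((r : Int), (cl : Int), (A : Int)))]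
    apply List.map_congr_left
    intro u hu
    rw [List.mem_range] at hu
    have huHW : u < H * W := lt_of_lt_of_le hu hRW
    have hHW0 : 0 < H * W := lt_of_le_of_lt (Nat.zero_le u) huHW
    simp only [Function.comp_apply]
    have m1 : (A * (H * W) + u) % (H * W) = u := by
      rw [Nat.add_comm, Nat.add_mul_mod_self_right, Nat.mod_eq_of_lt huHW]
    have d1 : (A * (H * W) + u) / (H * W) = A := by
      rw [Nat.add_comm, Nat.add_mul_div_right _ _ hHW0, Nat.div_eq_of_lt huHW, Nat.zero_add]
    rw [m1, d1]
  · apply List.map_congr_left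
    intro cl hcl
    rw [List.mem_range] at hcl
    have hclW : cl < W := lt_of_lt_of_le hcl (le_of_lt hCc)
    have hs : R * W + cl < H * W := lt_of_lt_of_le (by omega) hRC
    have hHW0 : 0 < H * W := lt_of_le_of_lt (Nat.zero_le _) hs
    simp only [Function.comp_apply]
    have e0 : A * (H * W) + R * W + cl = A * (H * W) + (R * W + cl) := by ring
    have m1 : (A * (H * W) + (R * W + cl)) % (H * W) = R * W + cl := by
      rw [Nat.add_comm, Nat.add_mul_mod_self_right, Nat.mod_eq_of_lt hs]
    have d1 : (A * (H * W) + (R * W + cl)) / (H * W) = A := by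
      rw [Nat.add_comm, Nat.add_mul_div_right _ _ hHW0, Nat.div_eq_of_lt hs, Nat.zero_add]
    have dW : (R * W + cl) / W = R := by
      rw [mul_comm R W, Nat.mul_add_div hW0, Nat.div_eq_of_lt hclW, Nat.add_zero]
    have mW : (R * W + cl) % W = cl := by
      rw [mul_comm R W, Nat.mul_add_mod, Nat.mod_eq_of_lt hclW]
    rw [e0, m1, d1, dW, mW]


-- ===== VERDICT (by name: the statement is the Claim_ definition above) =====
theorem adaptive_lsb_indices_spec : Claim_equal_adaptive_lsb_indices := by
  intro img_shape data_len _ hpre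
  obtain ⟨h, w, c⟩ := img_shape
  unfold Spec_adaptive_lsb_indices
  unfold Pre_adaptive_lsb_indices at hpre
  by_cases hd : data_len ≤ 0
  · simp [adaptive_lsb_indices, adaptive_lsb_indices_alt, hd,
      PySem.List.pyRange_one_eq_nil (by omega : data_len ≤ (0:Int))]
  · rw [not_le] at hd
    obtain ⟨hh, hw, hc⟩ := hpre.resolve_left (by omega)
    simp only at hh hw hc
    obtain ⟨H, rfl⟩ : ∃ H : Nat, h = (H : Int) := ⟨h.toNat, (Int.toNat_of_nonneg hh.le).symm⟩
    obtain ⟨W, rfl⟩ : ∃ W : Nat, w = (W : Int) := ⟨w.toNat, (Int.toNat_of_nonneg hw.le).symm⟩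
    obtain ⟨C, rfl⟩ : ∃ C : Nat, c = (C : Int) := ⟨c.toNat, (Int.toNat_of_nonneg hc.le).symm⟩
    obtain ⟨n, rfl⟩ : ∃ n : Nat, data_len = (n : Int) :=
      ⟨data_len.toNat, (Int.toNat_of_nonneg hd.le).symm⟩
    have hH : 0 < H := by exact_mod_cast hh
    have hW : 0 < W := by exact_mod_cast hw
    have hC : 0 < C := by exact_mod_cast hc
    have hN : 0 < C * (H * W) := by positivity
    -- A-side: a map over range n
    have hA : adaptive_lsb_indices ((H : Int), (W : Int), (C : Int)) (n : Int)
        = (List.range n).map (fun k =>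
            ((((k % (H * W)) / W : Nat) : Int), (((k % (H * W)) % W : Nat) : Int),
             (((k / (H * W)) % C : Nat) : Int))) := by
      unfold adaptive_lsb_indices
      simp only []
      rw [PySem.List.pyRange_zero_natCast, PySem.List.foldl_append_singleton_eq_map,
          List.nil_append, List.map_map]
      apply List.map_congr_left
      intro k _
      simp only [Function.comp_apply, ← Nat.cast_mul, PySem.Int.mod_natCast,
        PySem.Int.floordiv_natCast]
    -- B-side: the period list in closed form, then the tiling lemma
    have hB : adaptive_lsb_indices_alt ((H : Int), (W : Int), (C : Int)) (n : Int)
        = (List.range n).map (fun k =>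
            ((((k % (C * (H * W)) % (H * W)) / W : Nat) : Int),
             (((k % (C * (H * W)) % (H * W)) % W : Nat) : Int),
             (((k % (C * (H * W))) / (H * W) : Nat) : Int))) := by
      have inner : ∀ ch : Nat,
          (List.range H).flatMap
              (fun (row : Nat) =>
                (List.range W).map (fun (col : Nat) => ((row : Int), (col : Int), (ch : Int))))
            = (List.range (H * W)).map
                (fun (p : Nat) => (((p / W : Nat) : Int), ((p % W : Nat) : Int), ((ch : Nat) : Int))) :=
        fun ch =>
          flatMap_range_range H W (fun (row col : Nat) => ((row : Int), (col : Int), (ch : Int)))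
      have periodEq :
          (PySem.List.pyRange 0 (C : Int) 1).flatMap (fun ch =>
              (PySem.List.pyRange 0 (H : Int) 1).flatMap (fun row =>
                (PySem.List.pyRange 0 (W : Int) 1).map (fun col => (row, col, ch))))
            = (List.range (C * (H * W))).map
                (fun t => (((t % (H * W) / W : Nat) : Int), ((t % (H * W) % W : Nat) : Int),
                           ((t / (H * W) : Nat) : Int))) := by
        rw [PySem.List.pyRange_zero_natCast, PySem.List.pyRange_zero_natCast,
            PySem.List.pyRange_zero_natCast]
        simp only [List.flatMap_map, List.map_map, Function.comp_def]
        simp only [inner]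
        rw [flatMap_range_range C (H * W)
              (fun ch p => (((p / W : Nat) : Int), ((p % W : Nat) : Int), ((ch : Nat) : Int)))]
      have hNcast : (H : Int) * W * C = ((C * (H * W) : Nat) : Int) := by push_cast; ring
      have hHWcast : (H : Int) * W = ((H * W : Nat) : Int) := by push_cast; ring
      have hHW : 0 < H * W := by positivity
      have hr : n % (C * (H * W)) ≤ C * (H * W) := le_of_lt (Nat.mod_lt n hN)
      unfold adaptive_lsb_indices_alt
      simp only []
      rw [if_neg (by omega : ¬((n : Int) ≤ 0)), hNcast, hHWcast]
      simp only [PySem.Int.floordiv_natCast, PySem.Int.mod_natCast, Int.toNat_natCast]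
      split_ifs with hq
      · -- fewer bits than one period: only a prefix of the period is built
        have hq' : n / (C * (H * W)) = 0 := by exact_mod_cast hq
        have hlt : n < C * (H * W) := by
          rcases (Nat.div_eq_zero_iff).mp hq' with h0 | h0
          · omega
          · exact h0
        have hnn : n % (C * (H * W)) = n := Nat.mod_eq_of_lt hlt
        simp only [hq', hnn, List.replicate_zero, List.flatten_nil, List.nil_append]
        simp only [PySem.Int.floordiv_natCast, PySem.Int.mod_natCast,
          PySem.List.pyRange_zero_natCast, List.flatMap_map, List.map_map, Function.comp_def]
        have eRC : (n % (H * W) / W) * W + n % (H * W) % W = n % (H * W) := by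
          rw [mul_comm]; exact Nat.div_add_mod _ _
        have hRC : (n % (H * W) / W) * W + n % (H * W) % W ≤ H * W := by
          rw [eRC]; exact le_of_lt (Nat.mod_lt n hHW)
        rw [period_segments H W (n / (H * W)) (n % (H * W) / W) (n % (H * W) % W)
              (Nat.mod_lt _ hW) hRC, eRC, Nat.div_add_mod']
        rw [List.take_of_length_le (by simp)]
        apply List.map_congr_left
        intro k hk
        rw [List.mem_range] at hk
        rw [Nat.mod_eq_of_lt (lt_trans hk hlt)]
      · -- at least one full period is needed: the build yields the whole period
        have eA : C * (H * W) / (H * W) = C := by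
          rw [Nat.mul_div_assoc _ (dvd_refl _), Nat.div_self hHW, Nat.mul_one]
        have eM : C * (H * W) % (H * W) = 0 := Nat.mul_mod_left C (H * W)
        have h0 : PySem.List.pyRange 0 ((0 : Nat) : Int) 1 = [] := by
          rw [PySem.List.pyRange_zero_natCast]; simp
        simp only [PySem.Int.floordiv_natCast, PySem.Int.mod_natCast,
          eA, eM, Nat.zero_div, Nat.zero_mod, h0, List.flatMap_nil,
          List.map_nil, List.append_nil]
        rw [periodEq, flatten_replicate_take _ _ _ _ hr, Nat.div_add_mod']
    rw [hA, hB]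
    apply List.map_congr_left
    intro k _
    have h1 : k % (C * (H * W)) % (H * W) = k % (H * W) :=
      Nat.mod_mod_of_dvd k (dvd_mul_left _ _)
    have h2 : k % (C * (H * W)) / (H * W) = k / (H * W) % C := by
      rw [mul_comm C (H * W)]
      exact Nat.mod_mul_right_div_self k (H * W) C
    rw [h1, h2]
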